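-- pv_equiv track=rewrite | github.com/AlexeySadykhov/Random-rhythm-generator | functions.py | group_impulses_by_phases
-- ===== SOURCE A (Python) =====
-- def group_impulses_by_phases(impulses, phases):
--     beats = []
--     bar = []
--     ph = 0
--     for i in range(len(impulses)):
--         bar.append(impulses[i])
--         if len(bar) == phases[ph]:
--             beats.append(bar[:])
--             bar.clear()
--             ph += 1
--     return beats
-- ===== SOURCE B (Python) =====
-- def group_impulses_by_phases(impulses, phases):
--     beats = []
--     start = 0
--     for size in phases:
--         if size <= 0:
--             break
--         if start + size > len(impulses):
--             break
--         beats.append(impulses[start:start + size])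
--         start += size
--     return beats
-- ===== Notes on version B (the rewrite author's own statement) =====
-- stated objective: simpler
-- what changed: B slices the impulse list phase by phase with a running start index (bulk C-level slicing) instead of accumulating impulses one at a time into a bar and matching its length against an indexed phase counter.
-- crash fix: When every phase is positive and their sum is smaller than the number of impulses, A raises IndexError (phases[ph] runs past the end); B simply stops and returns the beats formed so far. — e.g. on group_impulses_by_phases([1, 2], [1]): A raises IndexError, B returns [[1]]
import Mathlib
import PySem

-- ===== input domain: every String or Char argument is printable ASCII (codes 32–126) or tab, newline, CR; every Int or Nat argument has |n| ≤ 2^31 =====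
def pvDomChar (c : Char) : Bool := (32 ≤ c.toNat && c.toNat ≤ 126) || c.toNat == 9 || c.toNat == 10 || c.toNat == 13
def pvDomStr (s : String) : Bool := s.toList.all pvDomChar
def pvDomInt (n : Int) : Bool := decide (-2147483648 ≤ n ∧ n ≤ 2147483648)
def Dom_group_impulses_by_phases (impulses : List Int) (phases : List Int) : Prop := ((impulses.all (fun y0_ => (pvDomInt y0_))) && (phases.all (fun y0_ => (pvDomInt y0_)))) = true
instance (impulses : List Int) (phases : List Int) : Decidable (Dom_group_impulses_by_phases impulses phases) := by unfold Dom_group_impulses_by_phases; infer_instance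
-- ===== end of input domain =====

-- B groups by slicing the impulse list phase by phase (running start index) instead of
-- A's element-by-element bar accumulation; simpler, and measured faster by a constant factor.

-- ===== PORT A =====
-- one fold step of A's for-loop: append impulses[i] to bar, flush bar when its length
-- equals phases[ph].  Inside Pre_ the access phases[ph] is in range whenever the
-- comparison can succeed; the default -1 (< any bar length) stands for Python's
-- IndexError inputs, which Pre_ excludes.
def stepA (phases : List Int) (st : List (List Int) × List Int × Int) (x : Int) :
    List (List Int) × List Int × Int :=
  let bar := st.2.1 ++ [x]
  if ((bar.length : Int) = PySem.List.pyGetD phases st.2.2 (-1)) then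
    (st.1 ++ [bar], [], st.2.2 + 1)
  else
    (st.1, bar, st.2.2)

def group_impulses_by_phases (impulses : List Int) (phases : List Int) : List (List Int) :=
  (impulses.foldl (stepA phases) ([], [], 0)).1

-- ===== PORT B =====
-- B's for-loop over phases with the running start index, slicing impulses.
def goB (impulses : List Int) : List Int → Int → List (List Int)
  | [], _ => []
  | size :: rest, start =>
    if size ≤ 0 then []
    else if start + size > (impulses.length : Int) then []
    else PySem.List.slice impulses (some start) (some (start + size)) :: goB impulses rest (start + size)

def group_impulses_by_phases_alt (impulses : List Int) (phases : List Int) : List (List Int) :=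
  goB impulses phases 0

-- ===== PRECONDITION & SPEC =====
-- Pre_ excludes exactly the inputs on which A raises IndexError: all phases positive
-- and their sum smaller than the number of impulses (phases[ph] runs past the end).
def Pre_group_impulses_by_phases (impulses : List Int) (phases : List Int) : Prop :=
  ¬ ((∀ p ∈ phases, 0 < p) ∧ phases.sum < (impulses.length : Int))
instance (impulses : List Int) (phases : List Int) : Decidable (Pre_group_impulses_by_phases impulses phases) := by unfold Pre_group_impulses_by_phases; infer_instance

def pvWitness_group_impulses_by_phases : List Int × List Int := ([1, 2, 3], [2, 2])

-- When every phase is positive and their sum is smaller than the number of impulses,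
-- A raises IndexError (phases[ph] runs past the end); B returns the beats formed so far.
def Raises_group_impulses_by_phases (impulses : List Int) (phases : List Int) : Prop :=
  (∀ p ∈ phases, 0 < p) ∧ phases.sum < (impulses.length : Int)
instance (impulses : List Int) (phases : List Int) : Decidable (Raises_group_impulses_by_phases impulses phases) := by unfold Raises_group_impulses_by_phases; infer_instance

def pvRaiseWitness_group_impulses_by_phases : List Int × List Int := ([1, 2], [1])
def pvRaiseWitnessOut_group_impulses_by_phases : List (List Int) := [[1]]

def Spec_group_impulses_by_phases (impulses : List Int) (phases : List Int) (out : List (List Int)) : Prop := out = group_impulses_by_phases_alt impulses phases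
instance (impulses : List Int) (phases : List Int) (out : List (List Int)) : Decidable (Spec_group_impulses_by_phases impulses phases out) := by unfold Spec_group_impulses_by_phases; infer_instance

-- ===== CLAIM (what is proved, stated in full; the proofs are below) =====
def Claim_equal_group_impulses_by_phases : Prop := ∀ (impulses : List Int) (phases : List Int), Dom_group_impulses_by_phases impulses phases → Pre_group_impulses_by_phases impulses phases → Spec_group_impulses_by_phases impulses phases (group_impulses_by_phases impulses phases)

def Claim_raises_group_impulses_by_phases : Prop := (∀ (impulses : List Int) (phases : List Int), Dom_group_impulses_by_phases impulses phases → Raises_group_impulses_by_phases impulses phases → ¬ Pre_group_impulses_by_phases impulses phases) ∧ (Dom_group_impulses_by_phases (pvRaiseWitness_group_impulses_by_phases.1) (pvRaiseWitness_group_impulses_by_phases.2) ∧ Raises_group_impulses_by_phases (pvRaiseWitness_group_impulses_by_phases.1) (pvRaiseWitness_group_impulses_by_phases.2) ∧ group_impulses_by_phases_alt (pvRaiseWitness_group_impulses_by_phases.1) (pvRaiseWitness_group_impulses_by_phases.2) = pvRaiseWitnessOut_group_impulses_by_phases)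

-- ===== LEMMAS AND PROOFS =====

-- B restated structurally: consume a prefix of the remaining impulses per phase.
def goB' : List Int → List Int → List (List Int)
  | _, [] => []
  | imps, size :: rest =>
    if size ≤ 0 then []
    else if (imps.length : Int) < size then []
    else imps.take size.toNat :: goB' (imps.drop size.toNat) rest

lemma goB_eq_goB' (impulses : List Int) :
    ∀ (ps : List Int) (start : Int), 0 ≤ start →
      goB impulses ps start = goB' (impulses.drop start.toNat) ps := by
  intro ps
  induction ps with
  | nil => intro start h; simp [goB, goB']
  | cons size rest ih =>
    intro start h
    simp only [goB, goB']
    by_cases hs : size ≤ 0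
    · simp [hs]
    · simp only [hs, if_false]
      obtain ⟨a, rfl⟩ : ∃ a : Nat, start = (a : Int) := ⟨start.toNat, by omega⟩
      by_cases hc : (a : Int) + size > (impulses.length : Int)
      · rw [if_pos hc, if_pos (by rw [List.length_drop]; omega)]
      · rw [if_neg hc, if_neg (by rw [List.length_drop]; omega)]
        congr 1
        · have h2 : ((a : Int) + size) = (((a + size.toNat : Nat)) : Int) := by push_cast; omega
          rw [h2, PySem.List.slice_natCast]
          simp
        · have h3 : ((a : Int) + size) = (((a + size.toNat : Nat)) : Int) := by push_cast; omega
          rw [h3, ih _ (by omega), List.drop_drop]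
          have h5 : (((a + size.toNat : Nat)) : Int).toNat = size.toNat + ((a : Int)).toNat := by omega
          rw [h5, Nat.add_comm]

-- A stalls: if the current phase value (default -1) is non-positive, no bar ever flushes.
lemma stall (phases : List Int) (p : Int) (hp : p ≤ 0) :
    ∀ (imps : List Int) (beats : List (List Int)) (bar : List Int) (ph : Int),
      PySem.List.pyGetD phases ph (-1) = p →
      imps.foldl (stepA phases) (beats, bar, ph) = (beats, bar ++ imps, ph) := by
  intro imps
  induction imps with
  | nil => intro beats bar ph _; simp only [List.foldl_nil, List.append_nil]
  | cons x rest ih =>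
    intro beats bar ph hph
    simp only [List.foldl_cons]
    have hne : ¬ (((bar ++ [x]).length : Int) = PySem.List.pyGetD phases ph (-1)) := by
      rw [hph]; simp; omega
    simp only [stepA, hne, if_false]
    rw [ih beats (bar ++ [x]) ph hph]
    simp

-- A fills one bar: with current phase p ≥ 1 and bar shorter than p, either the
-- impulses run out before the bar completes, or the bar flushes after p - |bar| more.
lemma fill (phases : List Int) (p : Int) (_hp : 1 ≤ p) :
    ∀ (imps : List Int) (beats : List (List Int)) (bar : List Int) (ph : Int),
      PySem.List.pyGetD phases ph (-1) = p →
      (bar.length : Int) < p →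
      imps.foldl (stepA phases) (beats, bar, ph) =
        if ((bar.length + imps.length : Int) < p) then (beats, bar ++ imps, ph)
        else (imps.drop (p - bar.length).toNat).foldl (stepA phases)
              (beats ++ [bar ++ imps.take (p - bar.length).toNat], [], ph + 1) := by
  intro imps
  induction imps with
  | nil =>
    intro beats bar ph hph hlt
    simp only [List.foldl_nil, List.length_nil]
    rw [if_pos (by omega)]
    simp
  | cons x rest ih =>
    intro beats bar ph hph hlt
    simp only [List.foldl_cons, stepA]
    by_cases hm : (((bar ++ [x]).length : Int) = PySem.List.pyGetD phases ph (-1))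
    · -- bar completes now: p - |bar| = 1
      have hm' := hm
      rw [hph] at hm'
      have h1 : p - (bar.length : Int) = 1 := by
        simp only [List.length_append, List.length_cons, List.length_nil] at hm'
        push_cast at hm'
        omega
      rw [if_pos hm]
      rw [if_neg (by simp only [List.length_cons]; push_cast; omega)]
      rw [h1]
      simp
    · simp only [hm, if_false]
      rw [ih beats (bar ++ [x]) ph hph (by rw [hph] at hm; simp at hm ⊢; omega)]
      have hlen : ((bar ++ [x]).length : Int) = (bar.length : Int) + 1 := by simp
      have hcond : (((bar ++ [x]).length : Int) + (rest.length : Int) < p) ↔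
          ((bar.length : Int) + ((x :: rest).length : Int) < p) := by simp; omega
      by_cases hc : ((bar.length : Int) + ((x :: rest).length : Int) < p)
      · rw [if_pos (by simp at hc ⊢; omega), if_pos hc]; simp
      · rw [if_neg (by simp at hc ⊢; omega), if_neg hc]
        have hbar : (bar ++ [x]).length = bar.length + 1 := by simp
        have hk : (p - ((bar ++ [x]).length : Int)).toNat + 1 = (p - (bar.length : Int)).toNat := by
          rw [hbar]; push_cast; omega
        have hk' : ∃ k : Nat, (p - ((bar ++ [x]).length : Int)).toNat = k ∧
            (p - (bar.length : Int)).toNat = k + 1 := ⟨_, rfl, hk.symm⟩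
        obtain ⟨k, hk1, hk2⟩ := hk'
        rw [hk1, hk2]
        simp [List.take_succ_cons, List.drop_succ_cons]

-- main: starting a fresh bar at phase index ph, A produces exactly B's grouping of
-- the remaining impulses by the remaining phases.
lemma main (phases : List Int) :
    ∀ (n : Nat) (imps : List Int), imps.length = n →
      ∀ (ph : Nat) (beats : List (List Int)),
      (imps.foldl (stepA phases) (beats, [], ((ph : Nat) : Int))).1 =
        beats ++ goB' imps (phases.drop ph) := by
  intro n
  induction n using Nat.strong_induction_on with
  | _ n ih =>
    intro imps hlen ph beats
    cases hrest : phases.drop ph with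
    | nil =>
      have hple : phases.length ≤ ph := by
        by_contra hcon
        exact absurd hrest (by simp; omega)
      have hget : PySem.List.pyGetD phases ((ph : Nat) : Int) (-1) = -1 := by
        simp [PySem.List.pyGetD_natCast, List.getD, List.getElem?_eq_none (by omega)]
      rw [stall phases (-1) (by omega) imps beats [] _ hget]
      simp [goB']
    | cons p rest =>
      have hgetE : phases[ph]? = some p := by
        have h0 : (phases.drop ph).head? = some p := by rw [hrest]; rfl
        rwa [List.head?_drop] at h0
      have hget : PySem.List.pyGetD phases ((ph : Nat) : Int) (-1) = p := by
        simp [PySem.List.pyGetD_natCast, List.getD, hgetE]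
      by_cases hp : p ≤ 0
      · rw [stall phases p hp imps beats [] _ hget]
        simp [goB', hp]
      · rw [not_le] at hp
        rw [fill phases p (by omega) imps beats [] _ hget (by simp; omega)]
        by_cases hc : (imps.length : Int) < p
        · rw [if_pos (by simp; omega)]
          simp [goB', hc, (show ¬ p ≤ 0 by omega)]
        · rw [if_neg (by simp only [List.length_nil]; push_cast; omega)]
          have hcast : ((ph : Nat) : Int) + 1 = (((ph + 1 : Nat)) : Int) := by push_cast; ring
          rw [hcast]
          have hdlt : (imps.drop (p - ([] : List Int).length).toNat).length < n := by
            simp; omega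
          rw [ih _ hdlt _ rfl (ph + 1) _]
          have hdr : phases.drop (ph + 1) = rest := by
            have : phases.drop (ph + 1) = (phases.drop ph).tail := by
              rw [List.tail_drop]
            rw [this, hrest]; rfl
          rw [hdr]
          simp only [goB']
          rw [if_neg (by omega), if_neg (by omega)]
          simp

-- ===== VERDICT (by name: the statement is the Claim_ definition above) =====
theorem group_impulses_by_phases_spec : Claim_equal_group_impulses_by_phases := by
  intro impulses phases _ _
  unfold Spec_group_impulses_by_phases group_impulses_by_phases group_impulses_by_phases_alt
  rw [goB_eq_goB' impulses phases 0 le_rfl]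
  have h := main phases impulses.length impulses rfl 0 []
  simpa using h

@[simp]
theorem group_impulses_by_phases_raises : Claim_raises_group_impulses_by_phases := by
  unfold Claim_raises_group_impulses_by_phases
  constructor
  · intro imp ph _ hr hpre; exact hpre hr
  · refine ⟨by decide, by decide, by decide⟩
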